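-- pv_equiv track=rewrite | github.com/gmarnellos/hoekstra_radseq_code | short_read_analysis/blast_from_rad_clusters.py | get_top_reads
-- ===== SOURCE A (Python) =====
-- def get_top_reads(seq,uniquedlines):
--     hits = []
--     for l in uniquedlines:
--         if l.startswith(seq):
--             hits.append(l.strip())
--
--     #return hits
--     try:
--         r1_pick,n,qual,ind,ct,r2,r2ct = sorted([(int(l.split()[1]), l.split()) for l in hits],reverse=True)[0][1]
--         r2_pick = sorted(zip(r2ct.split(','),r2.split(',')),reverse=True)[0][1]
--     except:
--         return None,None
--
--     return r1_pick,r2_pick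
-- ===== SOURCE B (Python) =====
-- def _parse(l):
--     ws = l.split()
--     return (int(ws[1]), ws)
--
-- def get_top_reads(seq, uniquedlines):
--     hits = [l.strip() for l in uniquedlines if l.startswith(seq)]
--     try:
--         top = max(_parse(l) for l in hits)
--         r1_pick, n, qual, ind, ct, r2, r2ct = top[1]
--         r2_pick = max(zip(r2ct.split(','), r2.split(',')))[1]
--     except:
--         return None, None
--     return r1_pick, r2_pick
-- ===== Notes on version B (the rewrite author's own statement) =====
-- stated objective: simpler
-- what changed: Replaces both full reverse-sorts followed by [0] with single-pass max scans over the same tuple generators (safe on ties because the whole tuple is the comparison key), keeping the try/except so empty or malformed input still yields (None, None).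
import Mathlib
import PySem

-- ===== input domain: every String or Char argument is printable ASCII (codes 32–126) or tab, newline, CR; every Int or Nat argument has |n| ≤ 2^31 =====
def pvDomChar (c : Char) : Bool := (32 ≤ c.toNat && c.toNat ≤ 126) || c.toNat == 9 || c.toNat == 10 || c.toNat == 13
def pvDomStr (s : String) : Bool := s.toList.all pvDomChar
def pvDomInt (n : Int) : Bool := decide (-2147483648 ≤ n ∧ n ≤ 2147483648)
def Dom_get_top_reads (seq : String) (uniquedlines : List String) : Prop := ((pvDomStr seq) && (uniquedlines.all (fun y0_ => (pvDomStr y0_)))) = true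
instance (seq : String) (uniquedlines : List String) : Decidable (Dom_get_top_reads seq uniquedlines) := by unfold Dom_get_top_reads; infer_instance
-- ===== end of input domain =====

-- B replaces A's two reverse-sorts + [0] with single-pass max scans (same tuple comparison,
-- so ties select the identical element); objective: simpler.

-- ===== PORT A =====
-- A-side helper: the tuple '(int(l.split()[1]), l.split())' built inside the comprehension;
-- none = the IndexError of [1] or the ValueError of int(), both swallowed by the bare except
def pvParseHit (l : String) : Option (Int × List String) :=
  let ws := PySem.Str.split₀ l
  match PySem.List.pyGet? ws (1 : Int) with
  | none => none
  | some w =>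
    match PySem.Int.ofStr? w with
    | none => none
    | some n => some (n, ws)

-- Python compares tuples and lists lexicographically: the key '(toLex p : Int ×ₗ List String)'
-- (resp. String ×ₗ String) is exactly that order; sorted(...)[0] is head?
def get_top_reads (seq : String) (uniquedlines : List String) : Option String × Option String :=
  let hits := uniquedlines.foldl
    (fun acc l => if PySem.Str.startswith l seq then acc ++ [PySem.Str.strip l] else acc) []
  match hits.mapM pvParseHit with
  | none => (none, none)                 -- the comprehension raised; caught by except
  | some tuples =>
    match (PySem.List.sorted tuples (fun p => (toLex p : Int ×ₗ List String)) true).head? with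
    | none => (none, none)               -- IndexError: sorted list empty
    | some top =>
      match top.2 with
      | [r1_pick, _n, _qual, _ind, _ct, r2, r2ct] =>
        -- ',' is a nonempty literal so split? is always some; the getD default is dead code
        let pairs := List.zip ((PySem.Str.split? r2ct ",").getD []) ((PySem.Str.split? r2 ",").getD [])
        match (PySem.List.sorted pairs (fun q => (toLex q : String ×ₗ String)) true).head? with
        | none => (none, none)           -- unreachable: zip of two nonempty lists
        | some q => (some r1_pick, some q.2)
      | _ => (none, none)                -- unpacking into 7 names raised ValueError

-- ===== PORT B =====
-- B-side tuple builder '(int(ws[1]), ws)': none = IndexError of ws[1] / ValueError of int()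
def pvParseHitB (l : String) : Option (Int × List String) :=
  let ws := PySem.Str.split₀ l
  (PySem.List.pyGet? ws (1 : Int)).bind (fun w => (PySem.Int.ofStr? w).map (fun n => (n, ws)))

-- picks r2 from the winning 7-field tuple; none = the unpacking ValueError
-- (the unpack is a chain of shallow cons-tests so its compiled matches are B's own)
def pvPickB (top : Int × List String) : Option (String × String) :=
  match top.2 with
  | [] => none
  | r1_pick :: t1 =>
  match t1 with
  | [] => none
  | _n :: t2 =>
  match t2 with
  | [] => none
  | _qual :: t3 =>
  match t3 with
  | [] => none
  | _ind :: t4 =>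
  match t4 with
  | [] => none
  | _ct :: t5 =>
  match t5 with
  | [] => none
  | r2 :: t6 =>
  match t6 with
  | [] => none
  | r2ct :: rest =>
  match rest with
  | _ :: _ => none
  | [] =>
    let pairs := List.zip ((PySem.Str.split? r2ct ",").getD []) ((PySem.Str.split? r2 ",").getD [])
    (PySem.List.max? pairs (fun q => (toLex q : String ×ₗ String))).map (fun best => (r1_pick, best.2))

def get_top_reads_alt (seq : String) (uniquedlines : List String) : Option String × Option String :=
  let hits := (uniquedlines.filter (fun l => PySem.Str.startswith l seq)).map PySem.Str.strip
  let res : Option (String × String) := do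
    let tuples ← hits.mapM pvParseHitB          -- max() consumes the whole generator
    let top ← PySem.List.max? tuples (fun p => (toLex p : Int ×ₗ List String))
    pvPickB top
  (res.map (fun r => (some r.1, some r.2))).getD (none, none)   -- the except branch yields (None, None)

-- ===== PRECONDITION & SPEC =====
def Spec_get_top_reads (seq : String) (uniquedlines : List String) (out : Option String × Option String) : Prop := out = get_top_reads_alt seq uniquedlines
instance (seq : String) (uniquedlines : List String) (out : Option String × Option String) : Decidable (Spec_get_top_reads seq uniquedlines out) := by unfold Spec_get_top_reads; infer_instance

-- ===== CLAIM (what is proved, stated in full; the proofs are below) =====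
def Claim_equal_get_top_reads : Prop := ∀ (seq : String) (uniquedlines : List String), Dom_get_top_reads seq uniquedlines → Spec_get_top_reads seq uniquedlines (get_top_reads seq uniquedlines)

-- ===== LEMMAS AND PROOFS =====

-- head of a stable reverse sort = first maximum, once the key is injective
lemma head?_sorted_rev_eq_max? {α κ : Type} [LinearOrder κ] (xs : List α) (key : α → κ)
    (hinj : Function.Injective key) :
    (PySem.List.sorted xs key true).head? = PySem.List.max? xs key := by
  cases hxs : PySem.List.sorted xs key true with
  | nil =>
    have h0 : xs = [] := (PySem.List.sorted_eq_nil_iff xs key true).mp hxs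
    subst h0
    simp [(PySem.List.max?_eq_none_iff ([] : List α) key).mpr rfl]
  | cons m t =>
    have hperm := PySem.List.sorted_perm xs key true
    rw [hxs] at hperm
    have hm : m ∈ xs := hperm.mem_iff.mp (by simp)
    have hge := PySem.List.key_head_sorted_rev_ge xs key hxs
    cases hmx : PySem.List.max? xs key with
    | none =>
      have : xs = [] := (PySem.List.max?_eq_none_iff xs key).mp hmx
      simp [this] at hm
    | some m2 =>
      have hm2 : m2 ∈ xs := PySem.List.max?_mem hmx
      have h1 : key m ≤ key m2 := PySem.List.max?_isMax hmx m hm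
      have h2 : key m2 ≤ key m := hge m2 hm2
      have : m = m2 := hinj (le_antisymm h1 h2)
      simp [this]

-- the generic lemma at the two concrete key types used by the ports (so rewrites match syntactically)
lemma head?_sorted_rev_eq_max?_r1 (xs : List (Int × List String)) :
    (PySem.List.sorted xs (fun p => (toLex p : Int ×ₗ List String)) true).head? =
      PySem.List.max? xs (fun p => (toLex p : Int ×ₗ List String)) :=
  head?_sorted_rev_eq_max? xs _ (fun _ _ h => toLex.injective h)

lemma head?_sorted_rev_eq_max?_r2 (xs : List (String × String)) :
    (PySem.List.sorted xs (fun q => (toLex q : String ×ₗ String)) true).head? =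
      PySem.List.max? xs (fun q => (toLex q : String ×ₗ String)) :=
  head?_sorted_rev_eq_max? xs _ (fun _ _ h => toLex.injective h)

lemma pvParseHitB_eq : pvParseHitB = pvParseHit := by
  funext l
  simp only [pvParseHit, pvParseHitB]
  cases PySem.List.pyGet? (PySem.Str.split₀ l) (1 : Int) with
  | none => rfl
  | some w =>
    dsimp only [Option.bind]
    cases PySem.Int.ofStr? w with
    | none => rfl
    | some n => rfl

theorem get_top_reads_spec_aux (seq : String) (uniquedlines : List String) :
    get_top_reads seq uniquedlines = get_top_reads_alt seq uniquedlines := by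
  unfold get_top_reads get_top_reads_alt
  rw [PySem.List.foldl_append_if]
  simp only [List.nil_append]
  rw [pvParseHitB_eq]
  cases hmm : ((uniquedlines.filter (fun l => PySem.Str.startswith l seq)).map PySem.Str.strip).mapM pvParseHit with
  | none => rfl
  | some tuples =>
    dsimp only [Bind.bind, Option.bind]
    rw [head?_sorted_rev_eq_max?_r1 tuples]
    cases hm1 : PySem.List.max? tuples (fun p => (toLex p : Int ×ₗ List String)) with
    | none => rfl
    | some top =>
      obtain ⟨v, ws⟩ := top
      dsimp only [Option.bind, pvPickB]
      match hws : ws with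
      | [r1_pick, _n, _qual, _ind, _ct, r2, r2ct] =>
        dsimp only
        rw [head?_sorted_rev_eq_max?_r2]
        cases hm2 : PySem.List.max? (List.zip ((PySem.Str.split? r2ct ",").getD []) ((PySem.Str.split? r2 ",").getD [])) (fun q => (toLex q : String ×ₗ String)) with
        | none => rfl
        | some best => rfl
      | [] => rfl
      | [a] => rfl
      | [a,b] => rfl
      | [a,b,c] => rfl
      | [a,b,c,d] => rfl
      | [a,b,c,d,e] => rfl
      | [a,b,c,d,e,f] => rfl
      | a::b::c::d::e::f::g::h::rest => rfl

-- ===== VERDICT (by name: the statement is the Claim_ definition above) =====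
theorem get_top_reads_spec : Claim_equal_get_top_reads := by
  intro seq uniquedlines _
  unfold Spec_get_top_reads
  exact get_top_reads_spec_aux seq uniquedlines
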